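-- pv_equiv track=rewrite | github.com/OverKrice3000/EFPythonTasks | lastDigitOfHugeNumber/main.py | find_reduced_exp
-- ===== SOURCE A (Python) =====
-- from typing import List
--
-- def find_multiplicative_group_cycle(base: int, mod: int) -> int:
--     start_base = base
--     prev_base = base
--     cycle = 0
--     while True:
--         cycle += 1
--         next_base = (prev_base * start_base) % mod
--         prev_base = next_base
--         if next_base == start_base:
--             return cycle
--
-- def find_reduced_exp(lst: List[int], cycle_len: int) -> int:
--     if len(lst) == 1:
--         cycled_pow = lst[0] % cycle_len
--         return cycle_len if cycled_pow == 0 else cycled_pow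
--
--     lst_head = lst[0]
--     lst_tail = lst[1:]
--     head_cycled = lst_head % cycle_len
--     # Only option when base and mod are not coprime
--     if head_cycled == 2 and cycle_len == 4:
--         return cycle_len
--     mult_cycle = find_multiplicative_group_cycle(head_cycled, cycle_len)
--     reduced_exp = find_reduced_exp(lst_tail, mult_cycle)
--     reduced_pow = pow(head_cycled, reduced_exp) % cycle_len
--
--     return cycle_len if reduced_pow == 0 else reduced_pow
-- ===== SOURCE B (Python) =====
-- from typing import List
--
-- def find_multiplicative_group_cycle(base: int, mod: int) -> int:
--     start_base = base
--     prev_base = base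
--     cycle = 0
--     while True:
--         cycle += 1
--         next_base = (prev_base * start_base) % mod
--         prev_base = next_base
--         if next_base == start_base:
--             return cycle
--
-- def find_reduced_exp(lst: List[int], cycle_len: int) -> int:
--     # Forward pass: walk all but the last element, pushing (reduced head, modulus)
--     # frames on a stack and shrinking the modulus to the head's cycle length;
--     # the 2-mod-4 case short-circuits the walk, otherwise the last element seeds acc.
--     frames = []
--     cl = cycle_len
--     acc = None
--     for x in lst[:-1]:
--         h = x % cl
--         if h == 2 and cl == 4:
--             acc = cl
--             break
--         frames.append((h, cl))
--         cl = find_multiplicative_group_cycle(h, cl)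
--     if acc is None:
--         last = lst[-1] % cl
--         acc = cl if last == 0 else last
--     # Backward pass: pop frames, exponentiating up the tower.
--     for h, m in reversed(frames):
--         r = pow(h, acc) % m
--         acc = m if r == 0 else r
--     return acc
-- ===== Notes on version B (the rewrite author's own statement) =====
-- stated objective: alternative
-- what changed: Replaces A's recursion with two explicit passes: a forward loop that pushes (residue, modulus) frames on a stack while shrinking the modulus (short-circuiting on the 2-mod-4 case), then a backward fold over the stack that exponentiates the accumulator up the tower.
import Mathlib
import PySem

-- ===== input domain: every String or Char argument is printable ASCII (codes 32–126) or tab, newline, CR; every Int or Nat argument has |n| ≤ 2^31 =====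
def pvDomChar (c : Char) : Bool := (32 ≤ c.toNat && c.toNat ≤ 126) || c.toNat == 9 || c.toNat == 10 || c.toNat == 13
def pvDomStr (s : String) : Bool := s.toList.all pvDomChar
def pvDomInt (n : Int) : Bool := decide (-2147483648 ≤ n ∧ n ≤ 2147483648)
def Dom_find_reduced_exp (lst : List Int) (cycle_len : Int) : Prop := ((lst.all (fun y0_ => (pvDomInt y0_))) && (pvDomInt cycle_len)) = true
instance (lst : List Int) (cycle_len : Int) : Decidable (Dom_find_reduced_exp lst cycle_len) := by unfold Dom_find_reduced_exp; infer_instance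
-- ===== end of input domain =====

-- B replaces A's recursion by two explicit passes (forward stack of (residue, modulus) frames, then a backward exponentiation fold); same cost, different decomposition.

-- ===== PORT A =====
-- Python's 'while True' in find_multiplicative_group_cycle can genuinely loop forever
-- (e.g. base 2, mod 8); the port carries fuel |mod|+1, which is exact wherever the
-- Python loop returns: a returning loop returns within |mod| iterations (the iterates
-- are residues mod `mod`, so the period of a value on its own cycle is ≤ |mod|).
-- Fuel exhaustion yields 0; Python never returns on those inputs, so nothing is claimed there.
def fmgcLoop (start_base mod : Int) : Int → Int → Nat → Int
  | _, _, 0 => 0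
  | prev_base, cycle, fuel + 1 =>
    let cycle' := cycle + 1
    let next_base := PySem.Int.mod (prev_base * start_base) mod
    if next_base == start_base then cycle'
    else fmgcLoop start_base mod next_base cycle' fuel

def find_multiplicative_group_cycle (base mod : Int) : Int :=
  fmgcLoop base mod base 0 (mod.natAbs + 1)

-- pow(head_cycled, reduced_exp): whenever the Python returns, reduced_exp ≥ 1 (it is a
-- value reduced modulo a positive loop count), so '^ reduced_exp.toNat' is exact there.
def find_reduced_exp (lst : List Int) (cycle_len : Int) : Int :=
  match lst with
  | [] => 0  -- Python raises IndexError on lst[0]; excluded by Pre_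
  | [x] =>
    let cycled_pow := PySem.Int.mod x cycle_len
    if cycled_pow == 0 then cycle_len else cycled_pow
  | lst_head :: lst_tail =>
    let head_cycled := PySem.Int.mod lst_head cycle_len
    if head_cycled == 2 && cycle_len == 4 then cycle_len
    else
      let mult_cycle := find_multiplicative_group_cycle head_cycled cycle_len
      let reduced_exp := find_reduced_exp lst_tail mult_cycle
      let reduced_pow := PySem.Int.mod (head_cycled ^ reduced_exp.toNat) cycle_len
      if reduced_pow == 0 then cycle_len else reduced_pow

-- ===== PORT B =====
-- forward pass over lst[:-1]: returns (frames, final modulus, early acc from the 2-mod-4 break)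
def fwdPass : List Int → Int → List (Int × Int) → List (Int × Int) × Int × Option Int
  | [], cl, frames => (frames, cl, none)
  | x :: rest, cl, frames =>
    let h := PySem.Int.mod x cl
    if h == 2 && cl == 4 then (frames, cl, some cl)
    else fwdPass rest (find_multiplicative_group_cycle h cl) (frames ++ [(h, cl)])

-- one backward step: acc under a frame (h, m)
def bwdStep (acc : Int) (hm : Int × Int) : Int :=
  let r := PySem.Int.mod (hm.1 ^ acc.toNat) hm.2
  if r == 0 then hm.2 else r

def find_reduced_exp_alt (lst : List Int) (cycle_len : Int) : Int :=
  let res := fwdPass lst.dropLast cycle_len []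
  let frames := res.1
  let acc0 : Int :=
    match res.2.2 with
    | some a => a
    | none =>
      let last := PySem.Int.mod ((PySem.List.pyGet? lst (-1)).getD 0) res.2.1
      if last == 0 then res.2.1 else last
  frames.reverse.foldl bwdStep acc0

-- ===== PRECONDITION & SPEC =====
-- Pre_ excludes the empty list (A raises IndexError on lst[0]) and cycle_len = 0
-- (A raises ZeroDivisionError on the first '%'); nothing else is excluded.
def Pre_find_reduced_exp (lst : List Int) (cycle_len : Int) : Prop := lst ≠ [] ∧ cycle_len ≠ 0
instance (lst : List Int) (cycle_len : Int) : Decidable (Pre_find_reduced_exp lst cycle_len) := by unfold Pre_find_reduced_exp; infer_instance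

def pvWitness_find_reduced_exp : List Int × Int := ([7, 3, 5], 4)

def Spec_find_reduced_exp (lst : List Int) (cycle_len : Int) (out : Int) : Prop := out = find_reduced_exp_alt lst cycle_len
instance (lst : List Int) (cycle_len : Int) (out : Int) : Decidable (Spec_find_reduced_exp lst cycle_len out) := by unfold Spec_find_reduced_exp; infer_instance

-- ===== CLAIM (what is proved, stated in full; the proofs are below) =====
def Claim_equal_find_reduced_exp : Prop := ∀ (lst : List Int) (cycle_len : Int), Dom_find_reduced_exp lst cycle_len → Pre_find_reduced_exp lst cycle_len → Spec_find_reduced_exp lst cycle_len (find_reduced_exp lst cycle_len)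

-- ===== LEMMAS AND PROOFS =====

-- B's two passes, started on an arbitrary accumulated frame stack, compute A's
-- recursion on init ++ [last] threaded through the pending frames.
theorem fwd_bwd_eq_find (init : List Int) :
    ∀ (last cl : Int) (frames : List (Int × Int)),
      (let res := fwdPass init cl frames
       let acc0 : Int :=
         match res.2.2 with
         | some a => a
         | none =>
           let l := PySem.Int.mod last res.2.1
           if l == 0 then res.2.1 else l
       res.1.reverse.foldl bwdStep acc0)
      = frames.reverse.foldl bwdStep (find_reduced_exp (init ++ [last]) cl) := by
  induction init with
  | nil =>
    intro last cl frames
    simp [fwdPass, find_reduced_exp]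
  | cons x rest ih =>
    intro last cl frames
    simp only [fwdPass]
    by_cases hsc : (PySem.Int.mod x cl == 2 && cl == 4) = true
    · -- short-circuit: frames as accumulated, acc = cl; A also returns cl
      have hA : find_reduced_exp (x :: (rest ++ [last])) cl = cl := by
        cases rest with
        | nil => simp [find_reduced_exp, hsc]
        | cons y ys => simp [find_reduced_exp, hsc]
      simp [hsc, hA]
    · have step := ih last (find_multiplicative_group_cycle (PySem.Int.mod x cl) cl)
        (frames ++ [(PySem.Int.mod x cl, cl)])
      have hA : find_reduced_exp (x :: (rest ++ [last])) cl
          = bwdStep (find_reduced_exp (rest ++ [last])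
              (find_multiplicative_group_cycle (PySem.Int.mod x cl) cl)) (PySem.Int.mod x cl, cl) := by
        cases rest with
        | nil => simp [find_reduced_exp, hsc, bwdStep]
        | cons y ys => simp [find_reduced_exp, hsc, bwdStep]
      simp at step
      simp [hsc]
      rw [step]
      rw [← hA]

theorem eq_alt_of_ne_nil (lst : List Int) (cycle_len : Int) (h : lst ≠ []) :
    find_reduced_exp lst cycle_len = find_reduced_exp_alt lst cycle_len := by
  obtain ⟨init, last, rfl⟩ : ∃ init last, lst = init ++ [last] := by
    cases hl : lst.reverse with
    | nil => simp_all [List.reverse_eq_nil_iff]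
    | cons a as =>
      exact ⟨as.reverse, a, by
        have := congrArg List.reverse hl
        simpa using this⟩
  unfold find_reduced_exp_alt
  have hlast : PySem.List.pyGet? (init ++ [last]) (-1) = some last :=
    PySem.List.pyGet?_neg_one_append_singleton ..
  simp only [List.dropLast_concat, hlast, Option.getD_some]
  have := fwd_bwd_eq_find init last cycle_len []
  simp only [List.reverse_nil, List.foldl_nil] at this
  exact this.symm

-- ===== VERDICT (by name: the statement is the Claim_ definition above) =====
theorem find_reduced_exp_spec : Claim_equal_find_reduced_exp := by
  intro lst cycle_len _ hpre
  exact eq_alt_of_ne_nil lst cycle_len hpre.1
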